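-- pv_equiv track=rewrite | github.com/Srikarvit/Advanced-Network-Scanner-and-Profiler | network_scanner.py | label_device
-- ===== SOURCE A (Python) =====
-- ROUTER_KEYWORDS = ("router", "gpon", "tp-link", "netgear", "linksys", "asus")
--
-- def label_device(ip: str, mac: str, hostname: str, my_ip: str, vendor_hint: str) -> str:
--     ip = ip.strip()
--     hostname_l = hostname.lower() if isinstance(hostname, str) else ""
--     vendor_l = vendor_hint.lower() if vendor_hint else ""
--     mac_prefix = mac[:8]
--
--     if ip == my_ip:
--         return "This PC"
--
--     if any(k in hostname_l for k in ROUTER_KEYWORDS):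
--         return "Router"
--     if any(k in vendor_l for k in ("router", "routerboard", "isp", "ont", "fiberhome", "zte", "huawei")):
--         return "Router"
--
--     if mac_prefix in ("44:00:49",):
--         return "VM / Docker Host"
--     if "docker" in hostname_l or "vm" in hostname_l or "virtual" in hostname_l or "virtualbox" in hostname_l:
--         return "VM / Docker Host"
--
--     if "android" in hostname_l or "android" in vendor_l:
--         return "Android Phone"
--     if "iphone" in hostname_l or "ipad" in hostname_l or "apple" in vendor_l:
--         return "Apple Device"
--
--     if "realtek" in vendor_l or "intel" in vendor_l or "broadcom" in vendor_l:
--         return "Laptop / Desktop"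
--     if "raspberry" in vendor_l:
--         return "Embedded / IoT (Raspberry Pi)"
--
--     return "Unknown Device"
-- ===== SOURCE B (Python) =====
-- # Different algorithm than the original cascade: evaluate ALL rules, collect the
-- # ranks of every rule that matches, and return the label of the MINIMUM rank
-- # (arg-min over an exhaustive match set instead of a first-match early-return chain).
-- # Correct because the original returns the label of the lowest-numbered matching
-- # group, which is exactly the minimum matched rank here.
--
-- LABELS = ("This PC", "Router", "VM / Docker Host", "Android Phone",
--           "Apple Device", "Laptop / Desktop",
--           "Embedded / IoT (Raspberry Pi)", "Unknown Device")
--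
-- HOST_KW = {"router": 1, "gpon": 1, "tp-link": 1, "netgear": 1, "linksys": 1,
--            "asus": 1, "docker": 2, "vm": 2, "virtual": 2, "virtualbox": 2,
--            "android": 3, "iphone": 4, "ipad": 4}
--
-- VENDOR_KW = {"router": 1, "routerboard": 1, "isp": 1, "ont": 1, "fiberhome": 1,
--              "zte": 1, "huawei": 1, "android": 3, "apple": 4, "realtek": 5,
--              "intel": 5, "broadcom": 5, "raspberry": 6}
--
-- def label_device(ip: str, mac: str, hostname: str, my_ip: str, vendor_hint: str) -> str:
--     h = hostname.lower()
--     v = vendor_hint.lower()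
--     hits = [7]  # rank 7 = "Unknown Device" always matches
--     if ip.strip() == my_ip:
--         hits.append(0)
--     if mac[:8] == "44:00:49":
--         hits.append(2)
--     hits += [r for k, r in HOST_KW.items() if k in h]
--     hits += [r for k, r in VENDOR_KW.items() if k in v]
--     return LABELS[min(hits)]
-- ===== Notes on version B (the rewrite author's own statement) =====
-- stated objective: alternative
-- what changed: Replaces A's short-circuit first-match if/return cascade with an exhaustive rule evaluation: all matched rule ranks (from two keyword->rank maps plus the ip and mac checks) are collected into a list and the label of the minimum rank is returned from an indexed label table.
import Mathlib
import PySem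

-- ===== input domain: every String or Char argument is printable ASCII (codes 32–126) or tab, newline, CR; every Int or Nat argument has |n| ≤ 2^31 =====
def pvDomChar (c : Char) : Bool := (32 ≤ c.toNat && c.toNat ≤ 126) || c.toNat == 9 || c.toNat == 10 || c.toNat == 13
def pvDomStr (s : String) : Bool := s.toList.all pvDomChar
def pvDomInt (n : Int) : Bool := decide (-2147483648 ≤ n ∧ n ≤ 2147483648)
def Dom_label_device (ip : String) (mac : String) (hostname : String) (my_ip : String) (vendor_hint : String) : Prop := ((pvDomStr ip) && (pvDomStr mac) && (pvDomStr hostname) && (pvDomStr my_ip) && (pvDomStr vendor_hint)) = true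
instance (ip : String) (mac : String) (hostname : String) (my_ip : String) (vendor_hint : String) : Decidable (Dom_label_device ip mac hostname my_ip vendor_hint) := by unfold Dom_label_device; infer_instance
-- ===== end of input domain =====

-- B replaces A's first-match if/return cascade by exhaustive rule evaluation: collect the ranks
-- of ALL matching rules and return the label of the minimum rank (alternative algorithm, same cost).

-- ===== PORT A =====
def ROUTER_KEYWORDS : List String := ["router", "gpon", "tp-link", "netgear", "linksys", "asus"]

def label_device (ip : String) (mac : String) (hostname : String) (my_ip : String) (vendor_hint : String) : String :=
  let ip := PySem.Str.strip ip
  let hostname_l := PySem.Str.lower hostname  -- isinstance(hostname, str) is always true under the type convention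
  let vendor_l := if vendor_hint ≠ "" then PySem.Str.lower vendor_hint else ""  -- str truthiness = nonempty
  let mac_prefix := PySem.Str.slice mac none (some 8)
  if ip == my_ip then "This PC"
  else if ROUTER_KEYWORDS.any (fun k => PySem.Str.isIn k hostname_l) then "Router"
  else if (["router", "routerboard", "isp", "ont", "fiberhome", "zte", "huawei"] : List String).any
            (fun k => PySem.Str.isIn k vendor_l) then "Router"
  else if (["44:00:49"] : List String).contains mac_prefix then "VM / Docker Host"
  else if PySem.Str.isIn "docker" hostname_l || PySem.Str.isIn "vm" hostname_l
          || PySem.Str.isIn "virtual" hostname_l || PySem.Str.isIn "virtualbox" hostname_l then "VM / Docker Host"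
  else if PySem.Str.isIn "android" hostname_l || PySem.Str.isIn "android" vendor_l then "Android Phone"
  else if PySem.Str.isIn "iphone" hostname_l || PySem.Str.isIn "ipad" hostname_l
          || PySem.Str.isIn "apple" vendor_l then "Apple Device"
  else if PySem.Str.isIn "realtek" vendor_l || PySem.Str.isIn "intel" vendor_l
          || PySem.Str.isIn "broadcom" vendor_l then "Laptop / Desktop"
  else if PySem.Str.isIn "raspberry" vendor_l then "Embedded / IoT (Raspberry Pi)"
  else "Unknown Device"

-- ===== PORT B =====
def LABELS : List String :=
  ["This PC", "Router", "VM / Docker Host", "Android Phone",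
   "Apple Device", "Laptop / Desktop", "Embedded / IoT (Raspberry Pi)", "Unknown Device"]

def HOST_KW : List (String × Nat) :=
  [("router", 1), ("gpon", 1), ("tp-link", 1), ("netgear", 1), ("linksys", 1),
   ("asus", 1), ("docker", 2), ("vm", 2), ("virtual", 2), ("virtualbox", 2),
   ("android", 3), ("iphone", 4), ("ipad", 4)]

def VENDOR_KW : List (String × Nat) :=
  [("router", 1), ("routerboard", 1), ("isp", 1), ("ont", 1), ("fiberhome", 1),
   ("zte", 1), ("huawei", 1), ("android", 3), ("apple", 4), ("realtek", 5),
   ("intel", 5), ("broadcom", 5), ("raspberry", 6)]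

def label_device_alt (ip : String) (mac : String) (hostname : String) (my_ip : String) (vendor_hint : String) : String :=
  let h := PySem.Str.lower hostname
  let v := PySem.Str.lower vendor_hint
  let hits : List Nat :=
    [7]  -- rank 7 = "Unknown Device" always matches
    ++ (if PySem.Str.strip ip == my_ip then [0] else [])
    ++ (if PySem.Str.slice mac none (some 8) == "44:00:49" then [2] else [])
    ++ HOST_KW.filterMap (fun p => if PySem.Str.isIn p.1 h then some p.2 else none)
    ++ VENDOR_KW.filterMap (fun p => if PySem.Str.isIn p.1 v then some p.2 else none)
  -- min(hits): hits is nonempty by construction ([7] head), so min? is some; and the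
  -- minimum is ≤ 7 < LABELS.length, so LABELS[min(hits)] never raises: getD defaults unreachable
  (PySem.List.pyGet? LABELS (((PySem.List.min? hits (fun r => r)).getD 7 : Nat) : Int)).getD "Unknown Device"

-- ===== PRECONDITION & SPEC =====
def Spec_label_device (ip : String) (mac : String) (hostname : String) (my_ip : String) (vendor_hint : String) (out : String) : Prop := out = label_device_alt ip mac hostname my_ip vendor_hint
instance (ip : String) (mac : String) (hostname : String) (my_ip : String) (vendor_hint : String) (out : String) : Decidable (Spec_label_device ip mac hostname my_ip vendor_hint out) := by unfold Spec_label_device; infer_instance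

-- ===== CLAIM (what is proved, stated in full; the proofs are below) =====
def Claim_equal_label_device : Prop := ∀ (ip : String) (mac : String) (hostname : String) (my_ip : String) (vendor_hint : String), Dom_label_device ip mac hostname my_ip vendor_hint → Spec_label_device ip mac hostname my_ip vendor_hint (label_device ip mac hostname my_ip vendor_hint)

-- ===== LEMMAS AND PROOFS =====

-- A's guarded vendor lowering equals B's unconditional lowering (lower "" = "")
theorem vendor_guard_eq (v : String) :
    (if v ≠ "" then PySem.Str.lower v else "") = PySem.Str.lower v := by
  by_cases hv : v = ""
  · rw [hv]; simp; decide
  · simp [hv]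

-- the matched-rank list of a keyword table (B's list comprehension), named for rewriting
def rks (h : String) (ps : List (String × Nat)) : List Nat :=
  ps.filterMap (fun p => if PySem.Str.isIn p.1 h then some p.2 else none)

theorem rks_def (h : String) (ps : List (String × Nat)) :
    ps.filterMap (fun p => if PySem.Str.isIn p.1 h then some p.2 else none) = rks h ps := rfl

theorem rks_cons (hs k : String) (r : Nat) (rest : List (String × Nat)) :
    rks hs ((k, r) :: rest) = if PySem.Str.isIn k hs then r :: rks hs rest else rks hs rest := by
  unfold rks
  rw [List.filterMap_cons]
  cases hres : PySem.Str.isIn k hs <;> simp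

theorem rks_nil (h : String) : rks h [] = [] := rfl

-- running min never exceeds its seed
theorem fmin_le (l : List Nat) (a : Nat) : l.foldl min a ≤ a := by
  induction l generalizing a with
  | nil => exact Nat.le_refl a
  | cons x t ih => exact Nat.le_trans (ih (min a x)) (Nat.min_le_left a x)

-- lowering the seed of a running min factors out
theorem fmin_seed (l : List Nat) (b c : Nat) (h : b ≤ c) :
    l.foldl min b = min b (l.foldl min c) := by
  induction l generalizing b c with
  | nil => simp only [List.foldl_nil]; omega
  | cons x t ih =>
    simp only [List.foldl_cons]
    rw [ih (min b x) (min c x) (by omega)]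
    have h1 := fmin_le t (min c x)
    omega

-- min over a concatenation = min of the two minima
theorem fmin_append (l1 l2 : List Nat) :
    (l1 ++ l2).foldl min 7 = min (l1.foldl min 7) (l2.foldl min 7) := by
  rw [List.foldl_append]
  exact fmin_seed l2 (l1.foldl min 7) 7 (fmin_le l1 7)

-- a running min over a nondecreasing list bounded by the seed is its first element
theorem foldl_min_stay (x : Nat) (t : List Nat) (h : ∀ y ∈ t, x ≤ y) : t.foldl min x = x := by
  induction t with
  | nil => rfl
  | cons y t ih =>
    simp only [List.foldl_cons]
    rw [Nat.min_eq_left (h y (by simp))]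
    exact ih (fun z hz => h z (by simp [hz]))

theorem foldl_min_eq_headD (l : List Nat) (a : Nat) (hs : l.Pairwise (· ≤ ·))
    (hb : ∀ x ∈ l, x ≤ a) : l.foldl min a = l.headD a := by
  cases l with
  | nil => rfl
  | cons x t =>
    simp only [List.foldl_cons, List.headD_cons]
    rw [Nat.min_eq_right (hb x (by simp))]
    exact foldl_min_stay x t (fun y hy => (List.pairwise_cons.mp hs).1 y hy)

-- the matched ranks form a subsequence of the table's rank column
theorem rks_sublist (hs : String) (ps : List (String × Nat)) :
    (rks hs ps).Sublist (ps.map Prod.snd) := by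
  induction ps with
  | nil => exact List.Sublist.refl []
  | cons p t ih =>
    obtain ⟨k, r⟩ := p
    rw [rks_cons]
    cases hres : PySem.Str.isIn k hs
    · simpa using List.Sublist.cons r ih
    · simpa using List.Sublist.cons₂ r ih

theorem headD_if {α : Type} (b : Prop) [Decidable b] (x d : α) (l l' : List α) :
    (if b then (x :: l) else l').headD d = if b then x else l'.headD d := by
  by_cases hb : b <;> simp [hb]

-- splitting a Bool-∨ condition: both cascades normalize to the same fully split chain
theorem if_or_split {α : Type} (a b : Bool) (x t : α) :
    (if (a || b) = true then x else t) = if a = true then x else if b = true then x else t := by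
  cases a <;> simp

-- the minimum matched host rank, grouped as A's branch conditions
theorem hostMin (h : String) :
    (rks h HOST_KW).foldl min 7
    = (if PySem.Str.isIn "router" h || (PySem.Str.isIn "gpon" h || (PySem.Str.isIn "tp-link" h ||
          (PySem.Str.isIn "netgear" h || (PySem.Str.isIn "linksys" h || PySem.Str.isIn "asus" h)))) then 1
       else if PySem.Str.isIn "docker" h || PySem.Str.isIn "vm" h || PySem.Str.isIn "virtual" h
               || PySem.Str.isIn "virtualbox" h then 2
       else if PySem.Str.isIn "android" h then 3
       else if PySem.Str.isIn "iphone" h || PySem.Str.isIn "ipad" h then 4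
       else 7) := by
  have hsub := rks_sublist h HOST_KW
  have hall : ∀ x ∈ HOST_KW.map Prod.snd, x ≤ 7 := by decide
  rw [foldl_min_eq_headD _ _ (List.Pairwise.sublist hsub (by decide)) (fun x hx => hall x (hsub.subset hx))]
  simp only [HOST_KW, rks_cons, rks_nil, headD_if, List.headD_nil, if_or_split]

-- the minimum matched vendor rank, grouped as A's branch conditions
theorem vendorMin (v : String) :
    (rks v VENDOR_KW).foldl min 7
    = (if PySem.Str.isIn "router" v || (PySem.Str.isIn "routerboard" v || (PySem.Str.isIn "isp" v ||
          (PySem.Str.isIn "ont" v || (PySem.Str.isIn "fiberhome" v ||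
          (PySem.Str.isIn "zte" v || PySem.Str.isIn "huawei" v))))) then 1
       else if PySem.Str.isIn "android" v then 3
       else if PySem.Str.isIn "apple" v then 4
       else if PySem.Str.isIn "realtek" v || PySem.Str.isIn "intel" v
               || PySem.Str.isIn "broadcom" v then 5
       else if PySem.Str.isIn "raspberry" v then 6
       else 7) := by
  have hsub := rks_sublist v VENDOR_KW
  have hall : ∀ x ∈ VENDOR_KW.map Prod.snd, x ≤ 7 := by decide
  rw [foldl_min_eq_headD _ _ (List.Pairwise.sublist hsub (by decide)) (fun x hx => hall x (hsub.subset hx))]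
  simp only [VENDOR_KW, rks_cons, rks_nil, headD_if, List.headD_nil, if_or_split]

-- ===== VERDICT (by name: the statement is the Claim_ definition above) =====
theorem label_device_spec : Claim_equal_label_device := by
  intro ip mac hostname my_ip vendor_hint _
  unfold Spec_label_device
  simp only [label_device, label_device_alt, vendor_guard_eq, ROUTER_KEYWORDS,
    List.any_cons, List.any_nil, Bool.or_false, List.contains_cons, List.contains_nil,
    List.cons_append, List.nil_append, rks_def]
  rw [PySem.List.min?_id_cons, Option.getD_some]
  simp only [fmin_append, hostMin, vendorMin]
  generalize (PySem.Str.strip ip == my_ip) = b0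
  generalize (PySem.Str.isIn "router" (PySem.Str.lower hostname) || (PySem.Str.isIn "gpon" (PySem.Str.lower hostname) || (PySem.Str.isIn "tp-link" (PySem.Str.lower hostname) || (PySem.Str.isIn "netgear" (PySem.Str.lower hostname) || (PySem.Str.isIn "linksys" (PySem.Str.lower hostname) || PySem.Str.isIn "asus" (PySem.Str.lower hostname)))))) = b1
  generalize (PySem.Str.isIn "router" (PySem.Str.lower vendor_hint) || (PySem.Str.isIn "routerboard" (PySem.Str.lower vendor_hint) || (PySem.Str.isIn "isp" (PySem.Str.lower vendor_hint) || (PySem.Str.isIn "ont" (PySem.Str.lower vendor_hint) || (PySem.Str.isIn "fiberhome" (PySem.Str.lower vendor_hint) || (PySem.Str.isIn "zte" (PySem.Str.lower vendor_hint) || PySem.Str.isIn "huawei" (PySem.Str.lower vendor_hint))))))) = b2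
  generalize (PySem.Str.slice mac none (some 8) == "44:00:49") = bm
  generalize (PySem.Str.isIn "docker" (PySem.Str.lower hostname) || PySem.Str.isIn "vm" (PySem.Str.lower hostname) || PySem.Str.isIn "virtual" (PySem.Str.lower hostname) || PySem.Str.isIn "virtualbox" (PySem.Str.lower hostname)) = b3
  generalize PySem.Str.isIn "android" (PySem.Str.lower hostname) = b4
  generalize PySem.Str.isIn "android" (PySem.Str.lower vendor_hint) = b5
  generalize (PySem.Str.isIn "iphone" (PySem.Str.lower hostname) || PySem.Str.isIn "ipad" (PySem.Str.lower hostname)) = b6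
  generalize PySem.Str.isIn "apple" (PySem.Str.lower vendor_hint) = b7
  generalize (PySem.Str.isIn "realtek" (PySem.Str.lower vendor_hint) || PySem.Str.isIn "intel" (PySem.Str.lower vendor_hint) || PySem.Str.isIn "broadcom" (PySem.Str.lower vendor_hint)) = b8
  generalize PySem.Str.isIn "raspberry" (PySem.Str.lower vendor_hint) = b9
  revert b0 b1 b2 bm b3 b4 b5 b6 b7 b8 b9
  decide
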